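-- pv_equiv track=rewrite | github.com/FelipeDreissig/PenseEmPy | Cap 9/Ex9.5.py | avoid
-- ===== SOURCE A (Python) =====
-- def avoid(palavra, restrito):
--     c = 0
--     for letra in palavra:
--         for caracter in restrito:
--             if letra.strip() == caracter:
--                 c += 1
--             else:
--                 pass
--     return c
-- ===== SOURCE B (Python) =====
-- def avoid(palavra, restrito):
--     cr = {}
--     for ch in restrito:
--         cr[ch] = cr.get(ch, 0) + 1
--     cp = {}
--     for l in palavra:
--         k = l.strip()
--         cp[k] = cp.get(k, 0) + 1
--     return sum(v * cr.get(k, 0) for k, v in cp.items())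
-- ===== Notes on version B (the rewrite author's own statement) =====
-- stated objective: faster
-- what changed: Replaces A's nested per-pair scan with two frequency tables built in one pass each, then a key-wise product over the distinct stripped characters of palavra.
import Mathlib
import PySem

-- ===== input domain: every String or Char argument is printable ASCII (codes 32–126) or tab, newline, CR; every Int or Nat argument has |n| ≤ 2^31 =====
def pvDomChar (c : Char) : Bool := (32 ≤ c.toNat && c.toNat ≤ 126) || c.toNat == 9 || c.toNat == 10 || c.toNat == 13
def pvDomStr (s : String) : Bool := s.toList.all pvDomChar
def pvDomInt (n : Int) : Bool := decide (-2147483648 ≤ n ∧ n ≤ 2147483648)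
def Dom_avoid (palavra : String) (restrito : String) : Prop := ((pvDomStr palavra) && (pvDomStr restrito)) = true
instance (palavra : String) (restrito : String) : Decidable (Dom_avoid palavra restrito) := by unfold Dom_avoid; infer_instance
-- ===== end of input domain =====

-- B replaces A's nested per-pair scan with two frequency tables built in one pass each plus a key-wise product over palavra's distinct stripped characters.


-- ===== PORT A =====
def avoid (palavra : String) (restrito : String) : Int :=
  palavra.toList.foldl (fun c letra =>
    restrito.toList.foldl (fun c caracter =>
      if PySem.Str.strip (String.mk [letra]) == String.mk [caracter] then c + 1 else c) c) 0

-- ===== PORT B =====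
def avoid_alt (palavra : String) (restrito : String) : Int :=
  let cr := restrito.toList.foldl
    (fun d ch => d.insert (String.mk [ch]) (d.getD (String.mk [ch]) 0 + 1))
    (PySem.Dict.mk [] : PySem.Dict String Int)
  let cp := palavra.toList.foldl
    (fun d l =>
      let k := PySem.Str.strip (String.mk [l])
      d.insert k (d.getD k 0 + 1))
    (PySem.Dict.mk [] : PySem.Dict String Int)
  (cp.items.map (fun kv => kv.2 * cr.getD kv.1 0)).sum

-- ===== PRECONDITION & SPEC =====
def Spec_avoid (palavra : String) (restrito : String) (out : Int) : Prop := out = avoid_alt palavra restrito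
instance (palavra : String) (restrito : String) (out : Int) : Decidable (Spec_avoid palavra restrito out) := by unfold Spec_avoid; infer_instance

-- ===== CLAIM (what is proved, stated in full; the proofs are below) =====
def Claim_equal_avoid : Prop := ∀ (palavra : String) (restrito : String), Dom_avoid palavra restrito → Spec_avoid palavra restrito (avoid palavra restrito)

-- ===== LEMMAS AND PROOFS =====

-- the stripped one-char strings of palavra / the one-char strings of restrito
def pvStrip1 (c : Char) : String := PySem.Str.strip (String.mk [c])
def pvOne (c : Char) : String := String.mk [c]

-- a 0/1-style sum over a nodup list containing x picks out g x
lemma pv_sum_ite_nodup {α : Type} [DecidableEq α] (l : List α) (x : α) (g : α → Int)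
    (hnd : l.Nodup) (hx : x ∈ l) :
    (l.map (fun k => if x = k then g k else 0)).sum = g x := by
  induction l with
  | nil => cases hx
  | cons a t ih =>
    rw [List.nodup_cons] at hnd
    simp only [List.map_cons, List.sum_cons]
    by_cases hxa : x = a
    · have hz : (t.map (fun k => if x = k then g k else 0)).sum = 0 := by
        apply List.sum_eq_zero
        intro y hy
        simp only [List.mem_map] at hy
        obtain ⟨k, hk, rfl⟩ := hy
        have hne : x ≠ k := fun e => hnd.1 (hxa ▸ e ▸ hk)
        simp [hne]
      rw [hz]
      simp [hxa]
    · rw [ih hnd.2 ((List.mem_cons.mp hx).resolve_left hxa)]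
      simp [hxa]

-- regrouping: a sum over occurrences equals a count-weighted sum over a nodup key list
lemma pv_sum_regroup {α : Type} [DecidableEq α] (P : List α) (l : List α) (g : α → Int)
    (hnd : l.Nodup) (hsub : ∀ p ∈ P, p ∈ l) :
    (P.map g).sum = (l.map (fun k => (P.count k : Int) * g k)).sum := by
  induction P with
  | nil => simp
  | cons x xs ih =>
    have hxs : ∀ p ∈ xs, p ∈ l := fun p hp => hsub p (List.mem_cons_of_mem _ hp)
    simp only [List.map_cons, List.sum_cons, ih hxs]
    have hsplit : (l.map (fun k => ((x :: xs).count k : Int) * g k)).sum =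
        (l.map (fun k => (xs.count k : Int) * g k)).sum +
        (l.map (fun k => if x = k then g k else 0)).sum := by
      rw [← List.sum_map_add]
      apply congrArg
      apply List.map_congr_left
      intro k _
      by_cases h : x = k
      · subst h
        simp [List.count_cons_self]
        ring
      · simp [h]
    rw [hsplit, pv_sum_ite_nodup l x g hnd (hsub x List.mem_cons_self)]
    ring

-- a counting loop keyed by 'key' builds the counter of the mapped list
lemma pv_counter_key {α κ : Type} [BEq κ] (l : List α) (key : α → κ) :
    l.foldl (fun d x => d.insert (key x) (d.getD (key x) 0 + 1))
      (PySem.Dict.mk [] : PySem.Dict κ Int) = PySem.Dict.counter (l.map key) := by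
  rw [← PySem.Dict.foldl_insert_getD_add_one_eq_counter, List.foldl_map]
  rfl

theorem avoid_spec_aux (palavra restrito : String) :
    avoid palavra restrito = avoid_alt palavra restrito := by
  classical
  set P := palavra.toList.map pvStrip1 with hP
  set R := restrito.toList.map pvOne with hR
  -- A is the sum over the stripped letters p of palavra of R.count p
  have hA : avoid palavra restrito = (P.map (fun p => (R.count p : Int))).sum := by
    unfold avoid
    rw [PySem.List.foldl_congr_mem
        (g := fun c letra => c + (R.count (pvStrip1 letra) : Int))]
    · rw [PySem.List.foldl_add]
      simp [hP, List.map_map, Function.comp_def]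
    · intro c letra _
      rw [PySem.List.foldl_if_add_one]
      have hc : restrito.toList.countP
          (fun caracter => PySem.Str.strip (String.mk [letra]) == String.mk [caracter])
          = R.count (pvStrip1 letra) := by
        rw [hR, List.count, List.countP_map]
        apply List.countP_congr
        intro r _
        simp only [pvStrip1, pvOne, Function.comp_apply, beq_iff_eq]
        exact eq_comm
      rw [hc]
  -- B is the count-weighted sum over the distinct keys of P
  have hB : avoid_alt palavra restrito =
      ((PySem.Set.ofList P).map (fun k => (P.count k : Int) * (R.count k : Int))).sum := by
    unfold avoid_alt
    have hcr : restrito.toList.foldl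
        (fun d ch => d.insert (String.mk [ch]) (d.getD (String.mk [ch]) 0 + 1))
        (PySem.Dict.mk [] : PySem.Dict String Int) = PySem.Dict.counter R :=
      pv_counter_key restrito.toList pvOne
    have hcp : palavra.toList.foldl
        (fun d l =>
          let k := PySem.Str.strip (String.mk [l])
          d.insert k (d.getD k 0 + 1))
        (PySem.Dict.mk [] : PySem.Dict String Int) = PySem.Dict.counter P :=
      pv_counter_key palavra.toList pvStrip1
    simp only []
    rw [hcr, hcp, PySem.Dict.items_counter, List.map_map]
    apply congrArg
    apply List.map_congr_left
    intro k _
    simp [PySem.Dict.getD_counter]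
  rw [hA, hB]
  exact pv_sum_regroup P (PySem.Set.ofList P)
    (fun p => (R.count p : Int)) (PySem.Set.nodup_ofList P)
    (fun p hp => (PySem.Set.mem_ofList P p).mpr hp)

-- ===== VERDICT (by name: the statement is the Claim_ definition above) =====
theorem avoid_spec : Claim_equal_avoid := by
  intro palavra restrito _
  unfold Spec_avoid
  exact avoid_spec_aux palavra restrito
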